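-- pv_equiv track=rewrite | github.com/mincrmatt12/nmfu | nmfu.py | _convert_binary_string
-- ===== SOURCE A (Python) =====
-- import string
--
-- def _convert_binary_string(binary_string: str):
--     """
--     Parse the hex binary string (with quotes too)
--     """
--
--     contents = [x for x in binary_string[1:-1] if x in string.hexdigits]
--
--     if len(contents) % 2 != 0:
--         raise ValueError("binary literal must have even number of characters")
--
--     result = ""
--
--     for word in zip(contents[::2], contents[1::2]):
--         result += chr(int(word[0] + word[1], base=16))
--
--     return result
-- ===== SOURCE B (Python) =====
-- import string
--
-- def _convert_binary_string(binary_string: str):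
--     """
--     Parse the hex binary string (with quotes too)
--     """
--     result = ""
--     pending = None
--     for c in binary_string[1:-1]:
--         if c in string.hexdigits:
--             if pending is None:
--                 pending = c
--             else:
--                 result += chr(int(pending + c, 16))
--                 pending = None
--     if pending is not None:
--         raise ValueError("binary literal must have even number of characters")
--     return result
-- ===== Notes on version B (the rewrite author's own statement) =====
-- stated objective: alternative
-- what changed: Single left-to-right pass keeping a pending high-nibble variable, instead of building the full filtered digit list, checking parity, and zipping the two strided slices contents[::2]/contents[1::2].
import Mathlib
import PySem

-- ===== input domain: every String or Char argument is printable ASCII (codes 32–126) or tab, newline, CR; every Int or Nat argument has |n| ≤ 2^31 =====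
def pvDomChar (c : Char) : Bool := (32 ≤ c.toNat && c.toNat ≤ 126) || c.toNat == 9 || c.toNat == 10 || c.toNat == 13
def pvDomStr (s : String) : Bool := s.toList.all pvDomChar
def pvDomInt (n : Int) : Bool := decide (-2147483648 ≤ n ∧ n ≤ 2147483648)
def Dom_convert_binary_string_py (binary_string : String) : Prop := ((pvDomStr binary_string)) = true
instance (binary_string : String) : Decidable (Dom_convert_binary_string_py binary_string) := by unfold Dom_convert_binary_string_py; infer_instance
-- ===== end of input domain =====

-- B replaces A's filter + parity check + strided slices + zip by a single pass with a pending high-nibble variable.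

-- 'x in string.hexdigits' (string.hexdigits = "0123456789abcdefABCDEF")
def pvIsHex (c : Char) : Bool := "0123456789abcdefABCDEF".toList.contains c

-- chr(int(a + b, base=16)); the .getD 0 is unreachable (both chars are hex digits)
def pvHexChar (a b : Char) : Char := Char.ofNat (((PySem.Int.ofCharsBase? [a, b] 16).getD 0).toNat)

-- ===== PORT A =====
def convert_binary_string_py (binary_string : String) : String :=
  let contents := (PySem.Str.slice binary_string (some 1) (some (-1))).toList.filter (fun x => pvIsHex x)
  if contents.length % 2 ≠ 0 then ""   -- raise ValueError (excluded by Pre_)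
  else
    ((((PySem.List.slice? contents none none 2).getD []).zip
      ((PySem.List.slice? contents (some 1) none 2).getD [])).foldl
      (fun result word => result.push (pvHexChar word.1 word.2)) "")

-- ===== PORT B =====
def pvStep (st : String × Option Char) (c : Char) : String × Option Char :=
  if pvIsHex c then
    match st.2 with
    | none => (st.1, some c)
    | some p => (st.1.push (pvHexChar p c), none)
  else st

def convert_binary_string_py_alt (binary_string : String) : String :=
  let st := (PySem.Str.slice binary_string (some 1) (some (-1))).toList.foldl pvStep ("", none)
  match st.2 with
  | some _ => ""   -- raise ValueError (excluded by Pre_)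
  | none => st.1

-- ===== PRECONDITION & SPEC =====
-- Pre_ excludes exactly the inputs whose quote-stripped body contains an odd number of
-- hex digits: there A (and B) raise ValueError.
def Pre_convert_binary_string_py (binary_string : String) : Prop :=
  ((PySem.Str.slice binary_string (some 1) (some (-1))).toList.countP (fun x => pvIsHex x)) % 2 = 0
instance (binary_string : String) : Decidable (Pre_convert_binary_string_py binary_string) := by unfold Pre_convert_binary_string_py; infer_instance

def pvWitness_convert_binary_string_py : String := "\"6a\""

def Spec_convert_binary_string_py (binary_string : String) (out : String) : Prop := out = convert_binary_string_py_alt binary_string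
instance (binary_string : String) (out : String) : Decidable (Spec_convert_binary_string_py binary_string out) := by unfold Spec_convert_binary_string_py; infer_instance

-- ===== CLAIM (what is proved, stated in full; the proofs are below) =====
def Claim_equal_convert_binary_string_py : Prop := ∀ (binary_string : String), Dom_convert_binary_string_py binary_string → Pre_convert_binary_string_py binary_string → Spec_convert_binary_string_py binary_string (convert_binary_string_py binary_string)

-- ===== LEMMAS AND PROOFS =====

-- even-indexed elements, odd-indexed elements, consecutive pairs
def pvEv {α : Type} : List α → List α
  | [] => []
  | [a] => [a]
  | a :: _ :: t => a :: pvEv t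

def pvOd {α : Type} : List α → List α
  | [] => []
  | [_] => []
  | _ :: b :: t => b :: pvOd t

def pvPairs {α : Type} : List α → List (α × α)
  | [] => []
  | [_] => []
  | a :: b :: t => (a, b) :: pvPairs t

theorem pv_range_filterMap_ev {α : Type} (l : List α) :
    (List.range ((l.length + 1) / 2)).filterMap (fun k => l[2 * k]?) = pvEv l := by
  induction l using pvEv.induct with
  | case1 => simp [pvEv]
  | case2 a => simp [pvEv]
  | case3 a b t ih =>
      have h2 : ((a :: b :: t).length + 1) / 2 = (t.length + 1) / 2 + 1 := by
        simp; omega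
      rw [h2, List.range_succ_eq_map, List.filterMap_cons]
      have hf : (fun k => (a :: b :: t)[2 * Nat.succ k]?) = fun k => t[2 * k]? := by
        funext k
        show (a :: b :: t)[2 * k + 1 + 1]? = t[2 * k]?
        simp
      simp only [List.filterMap_map, Function.comp_def, hf]
      simp [pvEv, ih]

theorem pv_range_filterMap_od {α : Type} (l : List α) :
    (List.range (l.length / 2)).filterMap (fun k => l[2 * k + 1]?) = pvOd l := by
  induction l using pvOd.induct with
  | case1 => simp [pvOd]
  | case2 a => simp [pvOd]
  | case3 a b t ih =>
      have h2 : (a :: b :: t).length / 2 = t.length / 2 + 1 := by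
        simp; omega
      rw [h2, List.range_succ_eq_map, List.filterMap_cons]
      have hf : (fun k => (a :: b :: t)[2 * Nat.succ k + 1]?) = fun k => t[2 * k + 1]? := by
        funext k
        show (a :: b :: t)[2 * k + 1 + 1 + 1]? = t[2 * k + 1]?
        simp
      simp only [List.filterMap_map, Function.comp_def, hf]
      simp [pvOd, ih]

theorem pv_slice_two {α : Type} (l : List α) :
    PySem.List.slice? l none none 2 = some (pvEv l) := by
  rw [← pv_range_filterMap_ev]
  unfold PySem.List.slice? PySem.List.sliceIndices
  norm_num
  congr 1
  congr 1
  split_ifs <;> omega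

theorem pv_slice_two_one {α : Type} (l : List α) :
    PySem.List.slice? l (some 1) none 2 = some (pvOd l) := by
  cases l with
  | nil => rfl
  | cons a t =>
      rw [← pv_range_filterMap_od]
      unfold PySem.List.slice? PySem.List.sliceIndices
      norm_num
      congr 1
      · funext k
        rw [show ((1:ℤ) + 2 * (k:ℤ)).toNat = 2 * k + 1 by omega]
        simp
      · congr 1
        split_ifs <;> omega

theorem pv_zip_ev_od {α : Type} (l : List α) : (pvEv l).zip (pvOd l) = pvPairs l := by
  induction l using pvPairs.induct with
  | case1 => simp [pvEv, pvOd, pvPairs]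
  | case2 a => simp [pvEv, pvOd, pvPairs]
  | case3 a b t ih => simp [pvEv, pvOd, pvPairs, ih]

theorem pv_fold_filter (l : List Char) (st : String × Option Char) :
    l.foldl pvStep st = (l.filter (fun x => pvIsHex x)).foldl pvStep st := by
  induction l generalizing st with
  | nil => simp
  | cons c l ih =>
      by_cases h : pvIsHex c = true
      · simp [h, List.foldl_cons, ih]
      · simp [h, List.foldl_cons, ih, pvStep]

theorem pv_fold_pairs (l : List Char) (h : ∀ c ∈ l, pvIsHex c = true)
    (he : l.length % 2 = 0) (res : String) :
    l.foldl pvStep (res, none) =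
      ((pvPairs l).foldl (fun r w => r.push (pvHexChar w.1 w.2)) res, none) := by
  induction l using pvPairs.induct generalizing res with
  | case1 => simp [pvPairs]
  | case2 a => simp at he
  | case3 a b t ih =>
      have ha : pvIsHex a = true := h a (by simp)
      have hb : pvIsHex b = true := h b (by simp)
      have ht : ∀ c ∈ t, pvIsHex c = true := fun c hc => h c (by simp [hc])
      have hte : t.length % 2 = 0 := by simp at he; omega
      simp only [List.foldl_cons, pvStep, ha, hb, if_true]
      rw [ih ht hte]
      simp [pvPairs]

-- ===== VERDICT (by name: the statement is the Claim_ definition above) =====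
theorem convert_binary_string_py_spec : Claim_equal_convert_binary_string_py := by
  intro s hdom hpre
  unfold Spec_convert_binary_string_py
  unfold convert_binary_string_py convert_binary_string_py_alt
  have hpre' : ((PySem.Str.slice s (some 1) (some (-1))).toList.filter (fun x => pvIsHex x)).length % 2 = 0 := by
    rw [← List.countP_eq_length_filter]
    exact hpre
  have hhex : ∀ c ∈ (PySem.Str.slice s (some 1) (some (-1))).toList.filter (fun x => pvIsHex x), pvIsHex c = true := by
    intro c hc
    exact (List.mem_filter.mp hc).2
  rw [pv_fold_filter]
  rw [pv_fold_pairs _ hhex hpre' ""]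
  simp only [hpre', pv_slice_two, pv_slice_two_one, Option.getD_some, pv_zip_ev_od]
  simp
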